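-- pv_equiv track=rewrite | github.com/paninka123321/Algorithms | functions/counting_table.py | adv_counting_table
-- ===== SOURCE A (Python) =====
-- def adv_counting_table(list1):
--     max_list1 = max(list1)
--     min_list1 = min(list1)
--     length_tab = max_list1 - min_list1 + 1
--     tab = [0] * length_tab
--     for k in list1:
--             tab[k - min_list1] +=1
--
--     return tab
-- ===== SOURCE B (Python) =====
-- def adv_counting_table(list1):
--     s = sorted(list1)
--     out = []
--     prev = s[0] - 1
--     i = 0
--     n = len(s)
--     while i < n:
--         v = s[i]
--         out.extend([0] * (v - prev - 1))
--         j = i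
--         while j < n and s[j] == v:
--             j += 1
--         out.append(j - i)
--         prev = v
--         i = j
--     return out
-- ===== Notes on version B (the rewrite author's own statement) =====
-- stated objective: alternative
-- what changed: Replaces the preallocated table incremented in place by a sort-then-scan: sort the list, then walk it once emitting a zero gap of length (v-prev-1) before each run and the run length for each distinct value.
import Mathlib
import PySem

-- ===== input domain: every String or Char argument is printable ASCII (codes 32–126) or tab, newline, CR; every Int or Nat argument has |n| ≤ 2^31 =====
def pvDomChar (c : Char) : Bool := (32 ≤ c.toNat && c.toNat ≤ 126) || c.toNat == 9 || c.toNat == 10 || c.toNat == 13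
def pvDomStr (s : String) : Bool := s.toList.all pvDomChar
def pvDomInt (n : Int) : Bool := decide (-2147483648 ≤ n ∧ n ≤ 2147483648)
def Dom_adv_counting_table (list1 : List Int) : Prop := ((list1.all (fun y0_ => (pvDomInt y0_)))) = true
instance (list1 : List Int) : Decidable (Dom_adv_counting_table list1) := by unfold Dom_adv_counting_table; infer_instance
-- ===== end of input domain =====

-- B replaces A's preallocated table filled in place by a sort-then-scan: sort the
-- list, then emit a zero gap and a run length per distinct value (alternative; same practical cost).

-- ===== PORT A =====
-- Literal port of A: max, min, [0]*(max-min+1), then in-place increments tab[k-min] += 1.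
def adv_counting_table (list1 : List Int) : List Int :=
  match PySem.List.max? list1 (fun x => x), PySem.List.min? list1 (fun x => x) with
  | some max_list1, some min_list1 =>
    let length_tab := max_list1 - min_list1 + 1
    let tab := PySem.List.pyRepeat [(0 : Int)] length_tab
    list1.foldl (fun tab k =>
      PySem.List.pySetD tab (k - min_list1)
        (PySem.List.pyGetD tab (k - min_list1) 0 + 1)) tab
  | _, _ => []  -- Python: max([]) raises ValueError; excluded by Pre_

-- ===== PORT B =====
-- The outer while loop of Source B: each step handles one run — it appends the zero gap
-- [0]*(v-prev-1), then the inner while loop counts the leading elements equal to v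
-- (takeWhile), appends that run length, and continues after the run (dropWhile).
def pvRunScan (prev : Int) : List Int → List Int
  | [] => []
  | v :: rest =>
    List.replicate (v - prev - 1).toNat 0
      ++ ((1 + ((rest.takeWhile (fun x => x == v)).length : Int))
          :: pvRunScan v (rest.dropWhile (fun x => x == v)))
termination_by l => l.length
decreasing_by
  have := List.length_dropWhile_le (p := fun x => x == v) (l := rest)
  simp; omega

-- Literal port of B: s = sorted(list1); prev = s[0] - 1; then the run scan above.
def adv_counting_table_alt (list1 : List Int) : List Int :=
  match PySem.List.sorted list1 (fun x => x) false with
  | [] => []  -- Python: s[0] raises IndexError on the empty list; excluded by Pre_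
  | v :: rest => pvRunScan (v - 1) (v :: rest)

-- ===== PRECONDITION & SPEC =====
-- A raises ValueError (max of an empty sequence) on the empty list; nothing else raises.
def Pre_adv_counting_table (list1 : List Int) : Prop := list1 ≠ []
instance (list1 : List Int) : Decidable (Pre_adv_counting_table list1) := by
  unfold Pre_adv_counting_table; infer_instance
def pvWitness_adv_counting_table : List Int := [3, 1, 1, 2]

def Spec_adv_counting_table (list1 : List Int) (out : List Int) : Prop := out = adv_counting_table_alt list1
instance (list1 : List Int) (out : List Int) : Decidable (Spec_adv_counting_table list1 out) := by
  unfold Spec_adv_counting_table; infer_instance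

-- ===== CLAIM (what is proved, stated in full; the proofs are below) =====
def Claim_equal_adv_counting_table : Prop := ∀ (list1 : List Int), Dom_adv_counting_table list1 → Pre_adv_counting_table list1 → Spec_adv_counting_table list1 (adv_counting_table list1)

-- ===== LEMMAS AND PROOFS =====

-- A's fill loop preserves the table's length.
lemma fill_length (mn : Int) (l : List Int) (tab : List Int) :
    (l.foldl (fun t k =>
      PySem.List.pySetD t (k - mn) (PySem.List.pyGetD t (k - mn) 0 + 1)) tab).length
      = tab.length := by
  induction l generalizing tab with
  | nil => rfl
  | cons k l ih =>
    simp only [List.foldl_cons]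
    rw [ih, PySem.List.length_pySetD]

-- The value at slot j after A's fill loop: old value plus the number of occurrences of mn + j.
lemma fill_getD (mn : Int) (l : List Int) (tab : List Int)
    (hb : ∀ k ∈ l, mn ≤ k ∧ (k - mn).toNat < tab.length)
    (j : Nat) (hj : j < tab.length) :
    (l.foldl (fun t k =>
      PySem.List.pySetD t (k - mn) (PySem.List.pyGetD t (k - mn) 0 + 1)) tab).getD j 0
      = tab.getD j 0 + (l.count (mn + (j : Int)) : Int) := by
  induction l generalizing tab with
  | nil => simp
  | cons k l ih =>
    obtain ⟨hk1, hk2⟩ := hb k (List.mem_cons_self)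
    have h0 : (0 : Int) ≤ k - mn := by omega
    simp only [List.foldl_cons]
    rw [PySem.List.pySetD_of_nonneg _ _ h0, PySem.List.pyGetD_of_nonneg _ _ h0]
    rw [ih (tab.set (k - mn).toNat (tab.getD (k - mn).toNat 0 + 1))
        (by intro x hx; simpa using hb x (List.mem_cons_of_mem _ hx))
        (by simpa using hj)]
    rw [List.count_cons]
    by_cases he : k = mn + (j : Int)
    · have hij : (k - mn).toNat = j := by omega
      rw [hij, List.getD_eq_getElem _ _ hj, List.getD_eq_getElem _ _ (by simpa using hj),
          List.getElem_set_self]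
      simp [he]
      ring
    · have hij : (k - mn).toNat ≠ j := by omega
      rw [List.getD_eq_getElem _ _ hj, List.getD_eq_getElem _ _ (by simpa using hj),
          List.getElem_set_ne (by omega)]
      simp [he]

-- In a ≤-sorted list, every element is at most the last one.
lemma le_getLast_of_pairwise (l : List Int) (h : l.Pairwise (· ≤ ·)) (hne : l ≠ []) :
    ∀ x ∈ l, x ≤ l.getLast hne := by
  induction l with
  | nil => simp
  | cons a t ih =>
    intro x hx
    rcases List.pairwise_cons.mp h with ⟨ha, ht⟩
    cases t with
    | nil => simp at hx; simp [hx]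
    | cons b t' =>
      rw [List.getLast_cons (by simp)]
      rcases List.mem_cons.mp hx with rfl | hx'
      · exact le_trans (ha b (by simp)) (ih ht (by simp) b (by simp))
      · exact ih ht (by simp) x hx'

-- B's run scan on a sorted list whose elements all exceed prev is exactly the table of
-- occurrence counts of prev+1, prev+2, …, getLast.
lemma runScan_eq (l : List Int) (prev : Int) (hne : l ≠ [])
    (hsort : l.Pairwise (· ≤ ·)) (hgt : ∀ x ∈ l, prev < x) :
    pvRunScan prev l
      = (List.range ((l.getLast hne) - prev).toNat).map
          (fun j : Nat => (l.count (prev + 1 + (j : Int)) : Int)) := by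
  induction hlen : l.length using Nat.strong_induction_on generalizing l prev with
  | _ n ih =>
  cases l with
  | nil => simp at hne
  | cons v rest =>
    rcases List.pairwise_cons.mp hsort with ⟨hvle, hrestp⟩
    have hvgt : prev < v := hgt v (by simp)
    rw [pvRunScan]
    generalize hsame : rest.takeWhile (fun x => x == v) = same
    generalize hdrop : rest.dropWhile (fun x => x == v) = rest'
    have hsplit : same ++ rest' = rest := by
      rw [← hsame, ← hdrop]; exact List.takeWhile_append_dropWhile
    have hsame_eq : ∀ x ∈ same, x = v := by
      intro x hx; rw [← hsame] at hx; simpa using List.mem_takeWhile_imp hx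
    have hrest'_sub : ∀ x ∈ rest', x ∈ rest := by
      intro x hx; rw [← hsplit]; exact List.mem_append_right _ hx
    have hrp : rest'.Pairwise (· ≤ ·) := by
      rw [← hdrop]; exact hrestp.sublist (List.dropWhile_sublist _)
    have hrest'_gt : ∀ x ∈ rest', v < x := by
      intro x hx
      have hle : v ≤ x := hvle x (hrest'_sub x hx)
      have hxne : x ≠ v := by
        cases hr : rest' with
        | nil => rw [hr] at hx; simp at hx
        | cons h0 t0 =>
          have hd : rest.dropWhile (fun x => x == v) = h0 :: t0 := by rw [hdrop]; exact hr
          have hh0v : h0 ≠ v := by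
            have := List.head_dropWhile_not (fun x => x == v) (l := rest) (by simp [hd])
            simpa [hd] using this
          rw [hr] at hx
          rcases List.mem_cons.mp hx with rfl | hx'
          · exact hh0v
          · have hp := hrp
            rw [hr] at hp
            have hb : h0 ≤ x := (List.pairwise_cons.mp hp).1 x hx'
            have hh0gt : v < h0 :=
              lt_of_le_of_ne (hvle h0 (hrest'_sub h0 (by rw [hr]; simp))) (Ne.symm hh0v)
            omega
      exact lt_of_le_of_ne hle (Ne.symm hxne)
    have hcount_same : same.count v = same.length :=
      List.count_eq_length.mpr (by intro x hx; exact (hsame_eq x hx).symm)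
    have hcount_lt_zero : ∀ w : Int, w < v → (v :: rest).count w = 0 := by
      intro w hw
      rw [List.count_eq_zero]
      intro hmem
      rcases List.mem_cons.mp hmem with h | h
      · omega
      · have := hvle _ h; omega
    cases hr : rest' with
    | nil =>
      -- whole list is the single run of v
      have hrest_eq : rest = same := by rw [← hsplit, hr, List.append_nil]
      have hall : ∀ x ∈ v :: rest, x = v := by
        intro x hx
        rcases List.mem_cons.mp hx with rfl | hx'
        · rfl
        · exact hsame_eq x (hrest_eq ▸ hx')
      have hlast : (v :: rest).getLast hne = v := hall _ (List.getLast_mem hne)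
      rw [hlast, pvRunScan]
      have hM : (v - prev).toNat = (v - prev - 1).toNat + 1 := by omega
      rw [hM, List.range_succ, List.map_append]
      congr 1
      · symm; rw [List.eq_replicate_iff]
        refine ⟨by simp, ?_⟩
        intro b hb
        simp only [List.mem_map, List.mem_range] at hb
        obtain ⟨j, hj, rfl⟩ := hb
        rw [hcount_lt_zero _ (by omega)]
        simp
      · simp only [List.map_cons, List.map_nil]
        have hv : prev + 1 + (((v - prev - 1).toNat : Nat) : Int) = v := by omega
        rw [hv, List.count_cons_self, hrest_eq, hcount_same]
        push_cast
        simp [add_comm]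
    | cons h0 t0 =>
      -- there are later runs; recurse on rest'
      have hrne : rest' ≠ [] := by rw [hr]; simp
      have hlast : (v :: rest).getLast hne = rest'.getLast hrne := by
        have h1 : v :: rest = (v :: same) ++ rest' := by rw [← hsplit]; rfl
        calc (v :: rest).getLast hne
            = ((v :: same) ++ rest').getLast (by rw [← h1]; exact hne) := by congr 1
          _ = rest'.getLast hrne := List.getLast_append_of_right_ne_nil _ _ hrne
      have hIH := ih rest'.length (by
          have h1 : rest'.length ≤ rest.length := by
            rw [← hdrop]; exact List.length_dropWhile_le ..
          simp at hlen; omega) rest' v hrne hrp hrest'_gt rfl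
      rw [← hr, hIH, hlast]
      set L := rest'.getLast hrne with hL
      have hLmem : L ∈ rest' := List.getLast_mem hrne
      have hLgt : v < L := hrest'_gt L hLmem
      have hdecomp : (L - prev).toNat = ((v - prev - 1).toNat + 1) + (L - v).toNat := by omega
      rw [hdecomp, List.range_add, List.map_append, List.range_succ, List.map_append,
          List.append_assoc]
      congr 1
      · -- the zero gap before the run of v
        symm; rw [List.eq_replicate_iff]
        refine ⟨by simp, ?_⟩
        intro b hb
        simp only [List.mem_map, List.mem_range] at hb
        obtain ⟨j, hj, rfl⟩ := hb
        rw [hcount_lt_zero _ (by omega)]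
        simp
      · simp only [List.map_cons, List.map_nil, List.singleton_append]
        congr 1
        · -- the run of v itself
          have hv : prev + 1 + (((v - prev - 1).toNat : Nat) : Int) = v := by omega
          rw [hv, List.count_cons_self, ← hsplit, List.count_append, hcount_same]
          have hz : rest'.count v = 0 := by
            rw [List.count_eq_zero]
            intro hmem; exact absurd rfl (ne_of_gt (hrest'_gt v hmem))
          rw [hz]
          push_cast
          simp [add_comm]
        · -- remaining slots: counts in rest' shifted by v - prev
          rw [List.map_map]
          apply List.map_congr_left
          intro j hj
          simp only [Function.comp_apply]
          have hvshift : prev + 1 + ((((v - prev - 1).toNat + 1) + j : Nat) : Int)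
              = v + 1 + (j : Int) := by push_cast; omega
          rw [hvshift]
          congr 1
          have hgtv : v < v + 1 + (j : Int) := by omega
          rw [List.count_cons, ← hsplit, List.count_append]
          have h1 : same.count (v + 1 + (j:Int)) = 0 := by
            rw [List.count_eq_zero]
            intro hmem
            have := hsame_eq _ hmem; omega
          rw [h1]
          simp
          omega

-- ===== VERDICT (by name: the statement is the Claim_ definition above) =====
theorem adv_counting_table_spec : Claim_equal_adv_counting_table := by
  intro list1 _ hpre
  unfold Spec_adv_counting_table
  obtain ⟨x, t, rfl⟩ := List.exists_cons_of_ne_nil hpre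
  unfold adv_counting_table adv_counting_table_alt
  rw [PySem.List.max?_id_cons, PySem.List.min?_id_cons]
  simp only
  set mn := t.foldl min x with hmn
  set mx := t.foldl max x with hmx
  have hminle : ∀ k ∈ x :: t, mn ≤ k := by
    intro k hk
    exact PySem.List.min?_isMin (by rw [PySem.List.min?_id_cons]) k hk
  have hmaxle : ∀ k ∈ x :: t, k ≤ mx := by
    intro k hk
    exact PySem.List.max?_isMax (by rw [PySem.List.max?_id_cons]) k hk
  have hmnmem : mn ∈ x :: t := PySem.List.min?_mem (by rw [PySem.List.min?_id_cons])
  have hmxmem : mx ∈ x :: t := PySem.List.max?_mem (by rw [PySem.List.max?_id_cons])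
  have hle : mn ≤ mx := le_trans (hminle x List.mem_cons_self) (hmaxle x List.mem_cons_self)
  -- B side: the sorted list
  cases hs : PySem.List.sorted (x :: t) (fun x => x) false with
  | nil => exact absurd ((PySem.List.sorted_eq_nil_iff (x :: t) (fun x => x) false).mp hs) (by simp)
  | cons v rest =>
    have hperm : (v :: rest).Perm (x :: t) := hs ▸ PySem.List.sorted_perm ..
    have hsorted : (v :: rest).Pairwise (· ≤ ·) := by
      have := PySem.List.sorted_pairwise (xs := x :: t) (key := fun x => x)
      rw [hs] at this; exact this
    have hne : (v :: rest : List Int) ≠ [] := by simp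
    have hheadle : ∀ y ∈ x :: t, v ≤ y :=
      PySem.List.key_head_sorted_le (x :: t) (fun x => x) hs
    -- head of the sorted list IS the minimum
    have hvmn : v = mn := le_antisymm (hheadle mn hmnmem) (hminle v (hperm.mem_iff.mp (by simp)))
    -- last of the sorted list IS the maximum
    have hlastmx : (v :: rest).getLast hne = mx := by
      apply le_antisymm
      · exact hmaxle _ (hperm.mem_iff.mp (List.getLast_mem hne))
      · exact le_getLast_of_pairwise _ hsorted hne mx (hperm.mem_iff.mpr hmxmem)
    -- evaluate B by the run-scan characterisation
    have hgt : ∀ y ∈ v :: rest, v - 1 < y := by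
      intro y hy
      have := hheadle y (hperm.mem_iff.mp hy)
      omega
    have hred : (match v :: rest with
        | [] => ([] : List Int)
        | v :: rest => pvRunScan (v - 1) (v :: rest)) = pvRunScan (v - 1) (v :: rest) := rfl
    rw [hred, runScan_eq (v :: rest) (v - 1) hne hsorted hgt, hlastmx]
    have hMeq : (mx - (v - 1)).toNat = (mx - mn + 1).toNat := by omega
    rw [hMeq]
    set M : Nat := (mx - mn + 1).toNat with hMdef
    -- the initial table on the A side
    rw [PySem.List.pyRepeat_singleton]
    have htablen : (List.replicate (mx - mn + 1).toNat (0 : Int)).length = M := by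
      simp [hMdef]
    have hbounds : ∀ k ∈ x :: t, mn ≤ k ∧
        (k - mn).toNat < (List.replicate (mx - mn + 1).toNat (0 : Int)).length := by
      intro k hk
      refine ⟨hminle k hk, ?_⟩
      have := hmaxle k hk
      rw [htablen]; omega
    apply List.ext_getElem
    · rw [fill_length]
      simp [htablen]
    · intro j hj1 hj2
      have hjM : j < M := by rw [fill_length, htablen] at hj1; exact hj1
      have hA := fill_getD mn (x :: t) (List.replicate (mx - mn + 1).toNat (0 : Int))
        hbounds j (by rw [htablen]; exact hjM)
      rw [← List.getD_eq_getElem _ 0 hj1, hA]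
      rw [List.getD_replicate]
      simp only [List.getElem_map, List.getElem_range]
      rw [hperm.count_eq]
      have : v - 1 + 1 + (j : Int) = mn + (j : Int) := by omega
      rw [this]
      omega
      exact hMdef ▸ hjM
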